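-- pv_equiv track=rewrite | github.com/nazariofernando/CreateTeam | solution.py | find
-- ===== SOURCE A (Python) =====
-- def find(array, solution):
--     best = 0
--     newRole = 0
--     newPerson = 0
--
--     best = max(array)
--     indexOfMax = array.index(best)
--
--     result = solution
--
--     if best == -1:
--         return result
--     else:
--         if indexOfMax <= 2:
--             newRole = 0
--         elif 3 <= indexOfMax <= 5:
--             newRole = 1
--         else:
--             newRole = 2
--         newPerson = indexOfMax % 3
--         i = 0
--         for element in array:
--             if newPerson == i % 3 or ((newRole % 3) * 3 <= i <= ((newRole+1)*3-1)):
--                 array[i] = -1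
--             i+=1
--         solution += best**2
--         return find(array, solution)
-- ===== SOURCE B (Python) =====
-- def find(array, solution):
--     # Iterative re-implementation: while-loop with an accumulator instead of tail
--     # recursion; the mask is rebuilt with one enumerate-comprehension instead of an
--     # index-counting for-loop.  (Return-value equivalence only: mutation of `array`
--     # is performed via slice assignment, so the final in-place contents may differ.)
--     total = solution
--     while True:
--         best = max(array)
--         if best == -1:
--             return total
--         idx = array.index(best)
--         row = min(idx // 3, 2)
--         col = idx % 3
--         array[:] = [-1 if (i % 3 == col or row * 3 <= i <= row * 3 + 2) else v
--                     for i, v in enumerate(array)]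
--         total += best * best
-- ===== Notes on version B (the rewrite author's own statement) =====
-- stated objective: simpler
-- what changed: Tail recursion replaced by an iterative while-loop with an accumulator; the row if-elif chain replaced by min(idx // 3, 2) and the index-counting for-loop that masks cells replaced by a single enumerate list-comprehension.
import Mathlib
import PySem

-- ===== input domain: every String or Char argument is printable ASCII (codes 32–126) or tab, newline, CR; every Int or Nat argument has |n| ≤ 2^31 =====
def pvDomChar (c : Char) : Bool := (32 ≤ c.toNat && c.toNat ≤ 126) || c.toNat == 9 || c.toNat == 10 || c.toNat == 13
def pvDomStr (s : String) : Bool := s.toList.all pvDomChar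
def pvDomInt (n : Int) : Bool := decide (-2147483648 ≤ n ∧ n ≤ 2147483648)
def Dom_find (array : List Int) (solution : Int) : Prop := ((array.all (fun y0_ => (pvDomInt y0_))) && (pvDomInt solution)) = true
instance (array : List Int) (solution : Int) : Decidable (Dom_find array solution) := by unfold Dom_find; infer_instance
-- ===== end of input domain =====

-- B replaces A's tail recursion by a while-loop with an accumulator and rebuilds the
-- masked grid with one enumerate-comprehension (objective: simpler, same cost);
-- equivalence is about the RETURN value only (both Pythons mutate `array` in place,
-- B via slice assignment, so the final cell contents may be written differently).

-- termination helpers, cited by the ports' decreasing_by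
theorem pvFoldlSet_length (p : Nat → Bool) (arr : List Int) (n : Nat) :
    ((List.range n).foldl (fun a i => if p i then a.set i (-1) else a) arr).length = arr.length := by
  induction n with
  | zero => simp
  | succ m ihm =>
    rw [List.range_succ, List.foldl_append, List.foldl_cons, List.foldl_nil]
    split
    · rw [List.length_set, ihm]
    · exact ihm

theorem pvFoldlSet_getElem? (p : Nat → Bool) (arr : List Int) (n j : Nat) :
    ((List.range n).foldl (fun a i => if p i then a.set i (-1) else a) arr)[j]? =
      if j < n ∧ p j then arr[j]?.map (fun _ => (-1 : Int)) else arr[j]? := by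
  induction n with
  | zero => simp
  | succ n ih =>
    rw [List.range_succ, List.foldl_append, List.foldl_cons, List.foldl_nil]
    by_cases hp : p n
    · rw [if_pos hp, List.getElem?_set]
      by_cases hj : n = j
      · subst hj
        have hlen := pvFoldlSet_length p arr n
        simp only [hlen]
        by_cases h : n < arr.length
        · rw [List.getElem?_eq_getElem h]; simp [h, hp]
        · rw [List.getElem?_eq_none (by omega)]; simp [h, hp]
      · rw [if_neg hj, ih]
        have : (j < n + 1 ∧ p j) ↔ (j < n ∧ p j) := by
          constructor
          · rintro ⟨h1, h2⟩; exact ⟨by omega, h2⟩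
          · rintro ⟨h1, h2⟩; exact ⟨by omega, h2⟩
        simp only [this]
    · rw [if_neg hp, ih]
      have : (j < n + 1 ∧ p j) ↔ (j < n ∧ p j) := by
        constructor
        · rintro ⟨h1, h2⟩
          rcases Nat.lt_succ_iff_lt_or_eq.mp h1 with h | h
          · exact ⟨h, h2⟩
          · subst h; exact absurd h2 (by simpa using hp)
        · rintro ⟨h1, h2⟩; exact ⟨by omega, h2⟩
      simp only [this]

theorem pvCountP_le (arr b : List Int)
    (hpt : ∀ j : Nat, b[j]? = arr[j]? ∨ b[j]? = some (-1)) :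
    b.countP (fun v => v != -1) ≤ arr.countP (fun v => v != -1) := by
  induction arr generalizing b with
  | nil =>
    have : b.countP (fun v => v != -1) = 0 := by
      rw [List.countP_eq_zero]
      intro x hx
      obtain ⟨j, hj⟩ := List.mem_iff_getElem?.mp hx
      rcases hpt j with h | h
      · rw [hj] at h; simp at h
      · rw [hj] at h; simp at h; simp [h]
    omega
  | cons x xs ih =>
    cases b with
    | nil => simp
    | cons y ys =>
      have h0 := hpt 0
      simp only [List.getElem?_cons_zero] at h0
      have htail : ∀ j : Nat, ys[j]? = xs[j]? ∨ ys[j]? = some (-1) := by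
        intro j; simpa using hpt (j + 1)
      have := ih ys htail
      rw [List.countP_cons, List.countP_cons]
      rcases h0 with h | h <;> simp only [Option.some.injEq] at h <;> subst h
      · omega
      · simp; omega

theorem pvCountP_lt (arr b : List Int)
    (hpt : ∀ j : Nat, b[j]? = arr[j]? ∨ b[j]? = some (-1))
    (idx : Nat) (ha : arr[idx]? ≠ some (-1)) (ha' : arr[idx]? ≠ none) (hb : b[idx]? = some (-1)) :
    b.countP (fun v => v != -1) < arr.countP (fun v => v != -1) := by
  induction arr generalizing b idx with
  | nil => simp at ha'
  | cons x xs ih =>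
    cases b with
    | nil => simp at hb
    | cons y ys =>
      have htail : ∀ j : Nat, ys[j]? = xs[j]? ∨ ys[j]? = some (-1) := by
        intro j; simpa using hpt (j + 1)
      rw [List.countP_cons, List.countP_cons]
      cases idx with
      | zero =>
        simp only [List.getElem?_cons_zero, Option.some.injEq] at ha hb
        subst hb
        have := pvCountP_le xs ys htail
        have hx : (x != -1) = true := by simpa using ha
        simp [hx]; omega
      | succ j =>
        simp only [List.getElem?_cons_succ] at ha ha' hb
        have := ih ys htail j ha ha' hb
        have h0 := hpt 0
        simp only [List.getElem?_cons_zero, Option.some.injEq] at h0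
        rcases h0 with h | h <;> subst h
        · omega
        · simp; omega

-- decrease lemma for A's mask (cited by find's decreasing_by)
theorem pvMaskA_decreases (arr : List Int) (best : Int) (p : Nat → Bool)
    (hmem : best ∈ arr) (hbest : best ≠ -1)
    (hp : p ((PySem.List.index? arr best).getD 0) = true) :
    ((List.range arr.length).foldl (fun a i => if p i then a.set i (-1) else a) arr).countP (fun v => v != -1)
      < arr.countP (fun v => v != -1) := by
  obtain ⟨k, hk⟩ := Option.isSome_iff_exists.mp ((PySem.List.index?_isSome_iff arr best).mpr hmem)
  obtain ⟨hklen, hkval, -⟩ := PySem.List.getElem_of_index?_eq_some hk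
  rw [hk] at hp
  simp only [Option.getD_some] at hp
  refine pvCountP_lt arr _ ?_ k ?_ ?_ ?_
  · intro j
    rw [pvFoldlSet_getElem?]
    split
    · rcases h : arr[j]? with _ | v
      · simp
      · simp
    · left; rfl
  · rw [List.getElem?_eq_getElem hklen, hkval]
    simp only [ne_eq, Option.some.injEq]
    exact hbest
  · rw [List.getElem?_eq_getElem hklen]; simp
  · rw [pvFoldlSet_getElem?, if_pos ⟨hklen, hp⟩, List.getElem?_eq_getElem hklen]
    simp

-- decrease lemma for B's mask (cited by findAltGo's decreasing_by)
theorem pvMaskB_decreases (arr : List Int) (best : Int) (p : Int → Bool)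
    (hmem : best ∈ arr) (hbest : best ≠ -1)
    (hp : p (((PySem.List.index? arr best).getD 0 : Nat) : Int) = true) :
    ((PySem.List.enumerate arr 0).map (fun q => if p q.1 then (-1 : Int) else q.2)).countP (fun v => v != -1)
      < arr.countP (fun v => v != -1) := by
  obtain ⟨k, hk⟩ := Option.isSome_iff_exists.mp ((PySem.List.index?_isSome_iff arr best).mpr hmem)
  obtain ⟨hklen, hkval, -⟩ := PySem.List.getElem_of_index?_eq_some hk
  rw [hk] at hp
  simp only [Option.getD_some] at hp
  have hchar : ∀ j : Nat, ((PySem.List.enumerate arr 0).map (fun q => if p q.1 then (-1 : Int) else q.2))[j]?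
      = arr[j]?.map (fun v => if p ((j : Nat) : Int) then (-1 : Int) else v) := by
    intro j
    rw [List.getElem?_map, PySem.List.getElem?_enumerate]
    rcases h : arr[j]? with _ | v <;> simp
  refine pvCountP_lt arr _ ?_ k ?_ ?_ ?_
  · intro j
    rw [hchar]
    rcases h : arr[j]? with _ | v
    · simp
    · by_cases hq : p ((j : Nat) : Int) = true
      · right; simp [hq]
      · left; simp at hq; simp [hq]
  · rw [List.getElem?_eq_getElem hklen, hkval]
    simp only [ne_eq, Option.some.injEq]
    exact hbest
  · rw [List.getElem?_eq_getElem hklen]; simp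
  · rw [hchar, List.getElem?_eq_getElem hklen]
    simp [hp]

-- named loop conditions (the ports' inline `if` tests; kept as defs so the
-- termination lemmas above apply by unification)
def pvCondA (newPerson newRole : Int) (i : Nat) : Bool :=
  (newPerson == PySem.Int.mod ((i : Nat) : Int) 3) ||
    (decide ((PySem.Int.mod newRole 3) * 3 ≤ ((i : Nat) : Int)) && decide (((i : Nat) : Int) ≤ (newRole + 1) * 3 - 1))

def pvCondB (col row : Int) (z : Int) : Bool :=
  (PySem.Int.mod z 3 == col) || (decide (row * 3 ≤ z) && decide (z ≤ row * 3 + 2))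

-- ===== PORT A =====
def find (array : List Int) (solution : Int) : Int :=
  match hmax : PySem.List.max? array (fun y => y) with
  | none => solution  -- Python: max([]) raises ValueError; excluded by Pre_find
  | some best =>
    let result := solution
    if hbest : best == -1 then result
    else
      let indexOfMax : Nat := (PySem.List.index? array best).getD 0
      let newRole : Int := if indexOfMax ≤ 2 then 0 else if 3 ≤ indexOfMax ∧ indexOfMax ≤ 5 then 1 else 2
      let newPerson : Int := PySem.Int.mod (indexOfMax : Int) 3
      let arr2 := (List.range array.length).foldl
        (fun (a : List Int) (i : Nat) => if pvCondA newPerson newRole i then a.set i (-1) else a) array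
      find arr2 (solution + best ^ 2)
termination_by array.countP (fun v => v != -1)
decreasing_by
  simp only [dite_eq_ite]
  refine pvMaskA_decreases array best _ (PySem.List.max?_mem hmax) (by simpa using hbest) ?_
  simp [pvCondA]

-- ===== PORT B =====
def findAltGo (array : List Int) (total : Int) : Int :=
  match hmax : PySem.List.max? array (fun y => y) with
  | none => total
  | some best =>
    if hbest : best == -1 then total
    else
      let idx : Nat := (PySem.List.index? array best).getD 0
      let row : Int := min (PySem.Int.floordiv (idx : Int) 3) 2
      let col : Int := PySem.Int.mod (idx : Int) 3
      let arr2 := (PySem.List.enumerate array 0).map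
        (fun q => if pvCondB col row q.1 then (-1 : Int) else q.2)
      findAltGo arr2 (total + best * best)
termination_by array.countP (fun v => v != -1)
decreasing_by
  simp only [dite_eq_ite]
  refine pvMaskB_decreases array best _ (PySem.List.max?_mem hmax) (by simpa using hbest) ?_
  simp [pvCondB]

def find_alt (array : List Int) (solution : Int) : Int := findAltGo array solution

-- ===== PRECONDITION & SPEC =====
-- Pre_ excludes only the empty list, on which Python's max([]) raises ValueError
-- (B's max([]) raises there too).
def Pre_find (array : List Int) (solution : Int) : Prop := array ≠ []
instance (array : List Int) (solution : Int) : Decidable (Pre_find array solution) := by unfold Pre_find; infer_instance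

def pvWitness_find : List Int × Int := ([3, 1, 4, 1, 5, 9, 2, 6, 5], 0)

def Spec_find (array : List Int) (solution : Int) (out : Int) : Prop := out = find_alt array solution
instance (array : List Int) (solution : Int) (out : Int) : Decidable (Spec_find array solution out) := by unfold Spec_find; infer_instance

-- ===== CLAIM (what is proved, stated in full; the proofs are below) =====
def Claim_equal_find : Prop := ∀ (array : List Int) (solution : Int), Dom_find array solution → Pre_find array solution → Spec_find array solution (find array solution)

-- ===== LEMMAS AND PROOFS =====

theorem pvCond_eq (idx j : Nat) :
    pvCondA (PySem.Int.mod ((idx : Nat) : Int) 3)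
        (if idx ≤ 2 then (0 : Int) else if 3 ≤ idx ∧ idx ≤ 5 then 1 else 2) j
      = pvCondB (PySem.Int.mod ((idx : Nat) : Int) 3)
        (min (PySem.Int.floordiv ((idx : Nat) : Int) 3) 2) (0 + (j : Int)) := by
  unfold pvCondA pvCondB
  rw [Bool.eq_iff_iff]
  simp only [PySem.Int.mod_eq_emod_of_pos (show (0:Int) < 3 by omega),
    PySem.Int.floordiv_eq_ediv_of_pos (show (0:Int) < 3 by omega),
    Bool.or_eq_true, Bool.and_eq_true, beq_iff_eq, decide_eq_true_eq]
  split_ifs <;> omega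

theorem pvMask_eq (arr : List Int) (idx : Nat) :
    (List.range arr.length).foldl
        (fun (a : List Int) (i : Nat) =>
          if pvCondA (PySem.Int.mod ((idx : Nat) : Int) 3)
              (if idx ≤ 2 then (0 : Int) else if 3 ≤ idx ∧ idx ≤ 5 then 1 else 2) i
          then a.set i (-1) else a) arr
      = (PySem.List.enumerate arr 0).map
        (fun q => if pvCondB (PySem.Int.mod ((idx : Nat) : Int) 3)
            (min (PySem.Int.floordiv ((idx : Nat) : Int) 3) 2) q.1
          then (-1 : Int) else q.2) := by
  apply List.ext_getElem?
  intro j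
  rw [pvFoldlSet_getElem?, List.getElem?_map, PySem.List.getElem?_enumerate]
  rcases h : arr[j]? with _ | v
  · have hj : ¬ j < arr.length := by
      simpa using List.getElem?_eq_none_iff.mp h
    rw [if_neg (by intro hc; exact hj hc.1)]
    simp
  · have hj : j < arr.length := by
      by_contra hc
      rw [List.getElem?_eq_none (by omega)] at h
      simp at h
    by_cases hc : pvCondA (PySem.Int.mod ((idx : Nat) : Int) 3)
        (if idx ≤ 2 then (0 : Int) else if 3 ≤ idx ∧ idx ≤ 5 then 1 else 2) j = true
    · have hc' := (pvCond_eq idx j) ▸ hc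
      rw [if_pos ⟨hj, hc⟩]
      simp at hc'
      simp [hc']
    · have hc' : pvCondB (PySem.Int.mod ((idx : Nat) : Int) 3)
          (min (PySem.Int.floordiv ((idx : Nat) : Int) 3) 2) (0 + (j : Int)) = false := by
        rw [← pvCond_eq idx j]; simpa using hc
      rw [if_neg (by intro hcc; exact hc hcc.2)]
      simp at hc'
      simp [hc']

theorem pvFind_eq (N : Nat) : ∀ (arr : List Int) (sol : Int),
    arr.countP (fun v => v != -1) ≤ N → find arr sol = findAltGo arr sol := by
  induction N with
  | zero =>
    intro arr sol hN
    rw [find.eq_def, findAltGo.eq_def]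
    rcases hmax : PySem.List.max? arr (fun y => y) with _ | best
    · simp
    · by_cases hbest : best = -1
      · simp [hbest]
      · exfalso
        have hmem := PySem.List.max?_mem hmax
        have : 0 < arr.countP (fun v => v != -1) := by
          rw [List.countP_pos_iff]
          exact ⟨best, hmem, by simpa using hbest⟩
        omega
  | succ N ih =>
    intro arr sol hN
    rw [find.eq_def, findAltGo.eq_def]
    rcases hmax : PySem.List.max? arr (fun y => y) with _ | best
    · simp
    · by_cases hbest : best = -1
      · simp [hbest]
      · have hmem := PySem.List.max?_mem hmax
        simp only [beq_iff_eq, hbest, dite_false]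
        rw [pvMask_eq arr ((PySem.List.index? arr best).getD 0)]
        have hlt := pvMaskB_decreases arr best
          (pvCondB (PySem.Int.mod ((((PySem.List.index? arr best).getD 0) : Nat) : Int) 3)
            (min (PySem.Int.floordiv ((((PySem.List.index? arr best).getD 0) : Nat) : Int) 3) 2))
          hmem hbest (by simp [pvCondB])
        rw [ih _ (sol + best ^ 2) (by omega), pow_two]

-- ===== VERDICT (by name: the statement is the Claim_ definition above) =====
theorem find_spec : Claim_equal_find := by
  intro array solution _ _
  unfold Spec_find find_alt
  exact pvFind_eq (array.countP (fun v => v != -1)) array solution le_rfl
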